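-- pv_equiv track=rewrite | github.com/larissalemos/CS50-PythonCourse | W2-Loops/plates.py | number_end
-- ===== SOURCE A (Python) =====
-- def number_end(t):
--     for char in t:
--         if char.isdigit():
--             index = t.index(char)
--             if t[index:].isdigit() and char != "0":
--                 return True
--             else:
--                 return False
--     else:
--         return True
-- ===== SOURCE B (Python) =====
-- def number_end(t):
--     head = t.rstrip("0123456789")
--     tail = t[len(head):]
--     if any(c.isdigit() for c in head):
--         return False
--     return tail == "" or tail[0] != "0"
-- ===== Notes on version B (the rewrite author's own statement) =====
-- stated objective: simpler
-- what changed: Instead of scanning forward and branching mid-loop with t.index and a slice, B strips the maximal digit suffix from the right (rstrip), rejects if a digit remains in the head, and otherwise checks the suffix's first character.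
import Mathlib
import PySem

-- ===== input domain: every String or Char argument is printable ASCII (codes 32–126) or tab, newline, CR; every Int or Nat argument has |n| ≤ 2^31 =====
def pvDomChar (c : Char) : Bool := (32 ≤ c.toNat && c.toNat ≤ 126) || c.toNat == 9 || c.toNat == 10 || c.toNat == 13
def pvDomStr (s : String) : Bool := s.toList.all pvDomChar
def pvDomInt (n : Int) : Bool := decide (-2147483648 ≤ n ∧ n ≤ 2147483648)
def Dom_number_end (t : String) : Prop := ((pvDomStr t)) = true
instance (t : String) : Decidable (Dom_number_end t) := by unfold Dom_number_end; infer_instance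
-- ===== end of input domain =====

-- B strips the maximal digit suffix from the right instead of A's forward scan with index/slice; return values agree.

-- ===== PORT A =====
-- the body of A's 'for' loop: first digit found → index/slice/isdigit check
def numberEndStep (t : String) (c : Char) : Bool :=
  let index := PySem.Str.find t (String.ofList [c])
  PySem.Str.strIsdigit (PySem.Str.slice t (some index) none) && decide (c ≠ '0')

-- A's for-loop over the characters of t with early return; 'else: return True' at exhaustion
def numberEndLoop (t : String) : List Char → Bool
  | [] => true
  | c :: rest =>
    if PySem.Chars.isdigit c then numberEndStep t c else numberEndLoop t rest

def number_end (t : String) : Bool := numberEndLoop t t.toList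

-- ===== PORT B =====
def number_end_alt (t : String) : Bool :=
  let cs := t.toList
  let head := (cs.reverse.dropWhile PySem.Chars.isdigit).reverse   -- t.rstrip("0123456789") (isdigit on ASCII)
  let tail := cs.drop head.length                                   -- t[len(head):]
  if head.any PySem.Chars.isdigit then false
  else tail.isEmpty || decide (tail[0]? ≠ some '0')

-- ===== PRECONDITION & SPEC =====
def Spec_number_end (t : String) (out : Bool) : Prop := out = number_end_alt t
instance (t : String) (out : Bool) : Decidable (Spec_number_end t out) := by unfold Spec_number_end; infer_instance

-- ===== CLAIM (what is proved, stated in full; the proofs are below) =====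
def Claim_equal_number_end : Prop := ∀ (t : String), Dom_number_end t → Spec_number_end t (number_end t)

-- ===== LEMMAS AND PROOFS =====

-- [c] is a prefix of l iff l starts with c
theorem pv_alt_def (t : String) : number_end_alt t =
    (if ((t.toList.reverse.dropWhile PySem.Chars.isdigit).reverse).any PySem.Chars.isdigit then false
     else (t.toList.drop ((t.toList.reverse.dropWhile PySem.Chars.isdigit).reverse).length).isEmpty
       || decide ((t.toList.drop ((t.toList.reverse.dropWhile PySem.Chars.isdigit).reverse).length)[0]? ≠ some '0')) := rfl

theorem pv_step_def (t : String) (c : Char) : numberEndStep t c =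
    (PySem.Str.strIsdigit (PySem.Str.slice t (some (PySem.Str.find t (String.ofList [c]))) none) && decide (c ≠ '0')) := rfl

theorem pv_singleton_prefix {c : Char} {l : List Char} : [c] <+: l ↔ l.head? = some c := by
  cases l with
  | nil => simp
  | cons h tl => constructor
                 · rintro ⟨r, hr⟩; simp_all
                 · intro h'; simp at h'; exact ⟨tl, by simp [h']⟩

-- a list with no digit is unchanged by dropWhile isdigit
theorem pv_dropWhile_clean {l : List Char}
    (h : ∀ c ∈ l, PySem.Chars.isdigit c = false) :
    l.dropWhile PySem.Chars.isdigit = l := by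
  cases l with
  | nil => rfl
  | cons c tl => simp [h c (by simp)]

-- value of B's port when t = pre ++ c :: rest, pre digit-free, c a digit
theorem pv_alt_at_digit (t : String) (pre rest : List Char) (c : Char)
    (ht : t.toList = pre ++ c :: rest)
    (hpre : ∀ x ∈ pre, PySem.Chars.isdigit x = false)
    (hc : PySem.Chars.isdigit c = true) :
    number_end_alt t = ((c :: rest).all PySem.Chars.isdigit && decide (c ≠ '0')) := by
  rw [pv_alt_def]
  simp only [ht]
  by_cases hall : ∀ x ∈ rest, PySem.Chars.isdigit x = true
  · -- the whole tail is digits: head = pre, tail = c :: rest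
    have hdw : ((pre ++ c :: rest).reverse).dropWhile PySem.Chars.isdigit = pre.reverse := by
      rw [List.reverse_append, List.reverse_cons, List.dropWhile_append]
      have h1 : rest.reverse.dropWhile PySem.Chars.isdigit = [] := by
        rw [List.dropWhile_eq_nil_iff]; intro x hx; exact hall x (List.mem_reverse.mp hx)
      rw [List.dropWhile_append] at *
      simp [h1, hc, pv_dropWhile_clean (by
        intro x hx; exact hpre x (List.mem_reverse.mp hx))]
    rw [hdw]
    have hany : pre.reverse.reverse.any PySem.Chars.isdigit = false := by
      simp only [List.reverse_reverse, List.any_eq_false]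
      intro x hx; simp [hpre x hx]
    rw [hany]
    have hlen : pre.reverse.reverse.length = pre.length := by simp
    simp only [Bool.false_eq_true, if_false, hlen, List.drop_left' rfl]
    simp [List.all_cons, hc, List.all_eq_true]
    exact fun _ => hall
  · -- a non-digit after c: head contains c, so B returns false
    push Not at hall
    obtain ⟨x, hx, hxd⟩ := hall
    have hne : rest.reverse.dropWhile PySem.Chars.isdigit ≠ [] := by
      rw [Ne, List.dropWhile_eq_nil_iff]
      push Not
      exact ⟨x, List.mem_reverse.mpr hx, by simpa using hxd⟩
    have hdw : ((pre ++ c :: rest).reverse).dropWhile PySem.Chars.isdigit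
        = rest.reverse.dropWhile PySem.Chars.isdigit ++ (c :: pre.reverse) := by
      rw [List.reverse_append, List.reverse_cons, List.dropWhile_append, List.dropWhile_append]
      simp [List.isEmpty_iff, hne]
    rw [hdw]
    have hany : ((rest.reverse.dropWhile PySem.Chars.isdigit ++ (c :: pre.reverse)).reverse).any
        PySem.Chars.isdigit = true := by
      simp only [List.any_eq_true]
      exact ⟨c, by simp, hc⟩
    rw [hany]
    simp [List.all_cons, hc]
    intro h
    exact absurd (h x hx) (by simp [hxd])

-- value of B's port on a digit-free string
theorem pv_alt_clean (t : String)
    (hpre : ∀ x ∈ t.toList, PySem.Chars.isdigit x = false) :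
    number_end_alt t = true := by
  rw [pv_alt_def]
  have hdw : (t.toList.reverse).dropWhile PySem.Chars.isdigit = t.toList.reverse :=
    pv_dropWhile_clean (by intro x hx; exact hpre x (List.mem_reverse.mp hx))
  rw [hdw]
  simp
  exact hpre

-- str.find of the first digit's character is the first digit's position
theorem pv_find_first (t : String) (pre rest : List Char) (c : Char)
    (ht : t.toList = pre ++ c :: rest)
    (hpre : ∀ x ∈ pre, PySem.Chars.isdigit x = false)
    (hc : PySem.Chars.isdigit c = true) :
    PySem.Str.find t (String.ofList [c]) = (pre.length : Int) := by
  have hcp : c ∉ pre := fun h => by simp [hpre c h] at hc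
  have hfe : PySem.Str.find t (String.ofList [c]) = PySem.Chars.find t.toList [c] := by
    simp
  rw [hfe, ht]
  have hinf : [c] <+: (pre ++ c :: rest).drop pre.length := by
    rw [List.drop_left' rfl]; exact pv_singleton_prefix.mpr rfl
  have hnn : 0 ≤ PySem.Chars.find (pre ++ c :: rest) [c] := by
    rw [PySem.Chars.find_nonneg_iff]
    exact (List.infix_iff_prefix_suffix.mpr ⟨_, hinf, List.drop_suffix _ _⟩)
  obtain ⟨hpref, hmin⟩ := PySem.Chars.find_spec hnn
  set f := PySem.Chars.find (pre ++ c :: rest) [c] with hf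
  have hle : f.toNat ≤ pre.length := by
    by_contra h
    exact hmin pre.length (by omega) hinf
  have hge : f.toNat = pre.length := by
    rcases Nat.lt_or_ge f.toNat pre.length with hlt | hge
    · exfalso
      have := pv_singleton_prefix.mp hpref
      rw [List.head?_drop] at this
      have : c ∈ pre := by
        have hgl : (pre ++ c :: rest)[f.toNat]? = pre[f.toNat]? := by
          rw [List.getElem?_append_left hlt]
        rw [hgl] at this
        exact List.mem_of_getElem? this
      exact hcp this
    · omega
  omega

-- the loop agrees with B once the scanned prefix is digit-free
theorem pv_loop (t : String) : ∀ (suf pre : List Char),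
    t.toList = pre ++ suf → (∀ x ∈ pre, PySem.Chars.isdigit x = false) →
    numberEndLoop t suf = number_end_alt t := by
  intro suf
  induction suf with
  | nil =>
    intro pre ht hpre
    rw [numberEndLoop, pv_alt_clean t (by rw [ht]; simpa using hpre)]
  | cons c rest ih =>
    intro pre ht hpre
    rw [numberEndLoop]
    by_cases hc : PySem.Chars.isdigit c = true
    · rw [if_pos hc]
      rw [pv_step_def, pv_find_first t pre rest c ht hpre hc,
          pv_alt_at_digit t pre rest c ht hpre hc]
      have hsl : PySem.Str.strIsdigit (PySem.Str.slice t (some (pre.length : Int)) none)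
          = PySem.Chars.strIsdigit (c :: rest) := by
        rw [PySem.Str.strIsdigit_eq, PySem.Str.toList_slice]
        simp only [PySem.Chars.slice_eq_listSlice, PySem.List.slice_from_natCast, ht,
          List.drop_left' rfl]
      rw [hsl]
      simp [PySem.Chars.strIsdigit]
    · rw [if_neg hc]
      exact ih (pre ++ [c]) (by simp [ht]) (by
        intro x hx
        rcases List.mem_append.mp hx with h | h
        · exact hpre x h
        · simp at h; subst h; simpa using hc)

theorem pv_main : ∀ (t : String), number_end t = number_end_alt t := by
  intro t
  exact pv_loop t t.toList [] (by simp) (by simp)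

-- ===== VERDICT (by name: the statement is the Claim_ definition above) =====
theorem number_end_spec : Claim_equal_number_end := by
  intro t _
  exact pv_main t
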